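-- pv_equiv track=rewrite | github.com/jameswalls/advent_of_code_2024 | days/04/part1.py | shifted_sub_puzzle
-- ===== SOURCE A (Python) =====
-- def shifted_sub_puzzle(puzzle: list[list[str]], reverse=False):
--     sub_puzzle = []
--
--     for idx, item in enumerate(puzzle):
--         if reverse:
--             sub_puzzle.append(item[::-1][idx:])
--         else:
--             sub_puzzle.append(item[idx:])
--
--     return list(zip(*sub_puzzle))
-- ===== SOURCE B (Python) =====
-- def shifted_sub_puzzle(puzzle: list[list[str]], reverse=False):
--     n = len(puzzle)
--     if n == 0:
--         return []
--     m = min(len(puzzle[i]) - i for i in range(n))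
--     ncols = m if m > 0 else 0
--     result = []
--     for j in range(ncols):
--         if reverse:
--             result.append(tuple(puzzle[i][len(puzzle[i]) - 1 - i - j] for i in range(n)))
--         else:
--             result.append(tuple(puzzle[i][i + j] for i in range(n)))
--     return result
-- ===== Notes on version B (the rewrite author's own statement) =====
-- stated objective: alternative
-- what changed: B computes each diagonal column directly by index arithmetic (ncols = clamped min of len(row_i)-i, element (i,j) read at puzzle[i][i+j] or its reversed-index twin) instead of A's building of per-row shifted/reversed copies and transposing them with zip(*...).
import Mathlib
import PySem

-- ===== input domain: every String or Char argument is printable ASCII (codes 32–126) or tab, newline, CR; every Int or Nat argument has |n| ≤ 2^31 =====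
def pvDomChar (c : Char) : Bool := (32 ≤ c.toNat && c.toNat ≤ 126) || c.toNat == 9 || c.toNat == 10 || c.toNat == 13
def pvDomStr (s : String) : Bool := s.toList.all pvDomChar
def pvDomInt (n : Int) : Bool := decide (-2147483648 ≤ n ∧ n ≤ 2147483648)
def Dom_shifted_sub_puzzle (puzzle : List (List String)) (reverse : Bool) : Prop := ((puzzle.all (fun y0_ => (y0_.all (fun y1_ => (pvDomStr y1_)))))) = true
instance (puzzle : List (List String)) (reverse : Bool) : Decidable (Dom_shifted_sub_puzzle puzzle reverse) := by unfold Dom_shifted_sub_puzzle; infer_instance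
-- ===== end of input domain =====

-- B replaces A's shift-rows-then-zip pipeline by direct diagonal extraction with index
-- arithmetic (objective: alternative decomposition, same asymptotic cost).

-- ===== PORT A =====
-- zip(*rows): Python's zip of the rows, as in list(zip(*sub_puzzle)); repeatedly emits the
-- tuple of heads until some iterator (or the argument list) is exhausted — exact.
def pvZipStar (rows : List (List String)) : List (List String) :=
  if rows.isEmpty || rows.any (·.isEmpty) then []
  else (rows.map (fun r => r.headI)) :: pvZipStar (rows.map List.tail)
termination_by rows.headI.length
decreasing_by
  cases rows with
  | nil => simp at *
  | cons r rs =>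
    simp only [List.isEmpty_cons, List.any_cons, Bool.or_eq_true, List.any_eq_true] at *
    cases r with
    | nil => simp at *
    | cons x xs => simp

def shifted_sub_puzzle (puzzle : List (List String)) (reverse : Bool) : List (List String) :=
  let sub_puzzle := (PySem.List.enumerate puzzle 0).foldl
    (fun acc p =>
      if reverse then
        acc ++ [PySem.List.slice (((PySem.List.slice? p.2 none none (-1)).getD [])) (some p.1) none]
      else
        acc ++ [PySem.List.slice p.2 (some p.1) none]) []
  pvZipStar sub_puzzle

-- ===== PORT B =====
def shifted_sub_puzzle_alt (puzzle : List (List String)) (reverse : Bool) : List (List String) :=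
  let n := puzzle.length
  if n = 0 then []
  else
    let m : Int := (((List.range n).map (fun i => ((puzzle.getD i []).length : Int) - i)).min?).getD 0
    let ncols : Nat := if 0 < m then m.toNat else 0
    (List.range ncols).map (fun j =>
      (List.range n).map (fun i =>
        let row := puzzle.getD i []
        if reverse then row.getD (row.length - 1 - i - j) ""
        else row.getD (i + j) ""))

-- ===== PRECONDITION & SPEC =====
def Spec_shifted_sub_puzzle (puzzle : List (List String)) (reverse : Bool) (out : List (List String)) : Prop := out = shifted_sub_puzzle_alt puzzle reverse
instance (puzzle : List (List String)) (reverse : Bool) (out : List (List String)) : Decidable (Spec_shifted_sub_puzzle puzzle reverse out) := by unfold Spec_shifted_sub_puzzle; infer_instance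

-- ===== CLAIM (what is proved, stated in full; the proofs are below) =====
def Claim_equal_shifted_sub_puzzle : Prop := ∀ (puzzle : List (List String)) (reverse : Bool), Dom_shifted_sub_puzzle puzzle reverse → Spec_shifted_sub_puzzle puzzle reverse (shifted_sub_puzzle puzzle reverse)

-- ===== LEMMAS AND PROOFS =====

def pvMinLen (rows : List (List String)) : Nat := ((rows.map List.length).min?).getD 0

theorem min?_le_mem (xs : List Nat) (a b : Nat) (h : xs.min? = some a) (hb : b ∈ xs) : a ≤ b := by
  rw [List.min?_eq_some_iff] at h
  exact h.2 b hb

theorem pvMinLen_zero (rows : List (List String)) (r : List String) (hr : r ∈ rows) (he : r = []) :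
    pvMinLen rows = 0 := by
  have h0 : (0:Nat) ∈ rows.map List.length := by
    exact List.mem_map.mpr ⟨r, hr, by simp [he]⟩
  unfold pvMinLen
  cases hm : (rows.map List.length).min? with
  | none => simp
  | some m => simpa using min?_le_mem _ m 0 hm h0

theorem foldl_min_succ (l : List Nat) (x : Nat) :
    (l.map (· - 1)).foldl min (x - 1) = (l.foldl min x) - 1 := by
  induction l generalizing x with
  | nil => simp
  | cons y ys ih => simp only [List.map_cons, List.foldl_cons]
                    rw [show min (x-1) (y-1) = (min x y) - 1 by omega, ih]

theorem one_le_foldl_min (l : List Nat) (x : Nat) (hx : 1 ≤ x) (hl : ∀ y ∈ l, 1 ≤ y) :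
    1 ≤ l.foldl min x := by
  induction l generalizing x with
  | nil => simpa
  | cons y ys ih =>
    simp only [List.foldl_cons]
    exact ih (min x y) (by have := hl y (by simp); omega) (fun z hz => hl z (by simp [hz]))

theorem pvMinLen_tails (r : List String) (rs : List (List String))
    (hne : ∀ t ∈ (r :: rs), t ≠ []) :
    pvMinLen (r :: rs) = pvMinLen ((r :: rs).map List.tail) + 1 := by
  unfold pvMinLen
  simp only [List.map_cons, List.min?_cons', Option.getD_some]
  have hlen : ∀ t : List String, t ∈ (r::rs) → t.tail.length = t.length - 1 := by
    intro t _; simp [List.length_tail]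
  rw [show (rs.map List.tail).map List.length = (rs.map List.length).map (· - 1) by
        simp [List.map_map, Function.comp, List.length_tail]]
  rw [show r.tail.length = r.length - 1 by simp [List.length_tail]]
  rw [foldl_min_succ]
  have h1 : 1 ≤ (rs.map List.length).foldl min r.length := by
    apply one_le_foldl_min
    · have := hne r (by simp); cases r <;> simp_all
    · intro y hy
      obtain ⟨t, ht, rfl⟩ := List.mem_map.mp hy
      have := hne t (by simp [ht]); cases t <;> simp_all
  omega

theorem tail_getD (l : List String) (j : Nat) : l.tail.getD j "" = l.getD (j+1) "" := by
  simp [List.getD, List.getElem?_tail]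

theorem headI_eq_getD (l : List String) (h : l ≠ []) : l.headI = l.getD 0 "" := by
  cases l <;> simp_all

theorem pvZipStar_eq (rows : List (List String)) :
    pvZipStar rows = (List.range (pvMinLen rows)).map (fun j => rows.map (fun r => r.getD j "")) := by
  fun_induction pvZipStar rows with
  | case1 rows hcond =>
    rcases Bool.or_eq_true _ _ |>.mp hcond with h | h
    · simp [List.isEmpty_iff.mp h, pvMinLen]
    · obtain ⟨r, hr, he⟩ := List.any_eq_true.mp h
      rw [pvMinLen_zero rows r hr (by simpa using he)]
      simp
  | case2 rows hcond ih =>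
    have ih' : pvZipStar (rows.map List.tail) =
        (List.range (pvMinLen (rows.map List.tail))).map
          (fun j => (rows.map List.tail).map (fun r => r.getD j "")) := by
      simpa using ih
    rw [ih']
    have hne : ∀ t ∈ rows, t ≠ [] := by
      intro t ht hc
      apply hcond
      simp only [Bool.or_eq_true, List.any_eq_true]
      exact Or.inr ⟨t, ht, by simp [hc]⟩
    obtain ⟨r, rs, rfl⟩ : ∃ r rs, rows = r :: rs := by
      cases rows with
      | nil => exact absurd (by simp) hcond
      | cons a l => exact ⟨a, l, rfl⟩
    rw [pvMinLen_tails r rs hne, List.range_succ_eq_map, List.map_cons]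
    congr 1
    · exact List.map_congr_left (fun t ht => headI_eq_getD t (hne t ht))
    · rw [List.map_map]
      apply List.map_congr_left
      intro j _
      show ((r::rs).map List.tail).map (fun t => t.getD j "") = (r::rs).map (fun t => t.getD (j+1) "")
      rw [List.map_map]
      exact List.map_congr_left (fun t _ => tail_getD t j)

theorem foldl_append_map {α β : Type} (f : α → β) (l : List α) (acc : List β) :
    l.foldl (fun a p => a ++ [f p]) acc = acc ++ l.map f := by
  induction l generalizing acc with
  | nil => simp
  | cons x xs ih => simp [List.foldl_cons, ih]

theorem map_enumerate_eq {α : Type} (g : Int × List String → α) (xs : List (List String)) (s : Int) :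
    (PySem.List.enumerate xs s).map g
      = (List.range xs.length).map (fun (i : Nat) => g (s + (i:Int), xs.getD i [])) := by
  apply List.ext_getElem?
  intro k
  by_cases hk : k < xs.length
  · simp [PySem.List.getElem_enumerate, hk, List.getD]
  · simp [hk, List.getElem?_eq_none (by omega : xs.length ≤ k)]

theorem foldl_min_toNat (l : List Int) (x : Int) :
    (l.foldl min x).toNat = (l.map Int.toNat).foldl min x.toNat := by
  induction l generalizing x with
  | nil => simp
  | cons y ys ih =>
    simp only [List.foldl_cons, List.map_cons]
    rw [show min x.toNat y.toNat = (min x y).toNat by omega]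
    exact ih (min x y)

theorem min?_getD_toNat (l : List Int) :
    ((l.min?).getD 0).toNat = ((l.map Int.toNat).min?).getD 0 := by
  cases l with
  | nil => simp
  | cons x xs =>
    simp only [List.min?_cons', List.map_cons, Option.getD_some]
    exact foldl_min_toNat xs x

theorem pvMinLen_le_mem (rows : List (List String)) (b : Nat) (hb : b ∈ rows.map List.length) :
    pvMinLen rows ≤ b := by
  unfold pvMinLen
  cases hm : (rows.map List.length).min? with
  | none => simp at hm; simp [hm] at hb
  | some m => simpa using min?_le_mem _ m b hm hb


theorem pvMain (puzzle : List (List String)) (reverse : Bool) :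
    shifted_sub_puzzle puzzle reverse = shifted_sub_puzzle_alt puzzle reverse := by
  have halt : shifted_sub_puzzle_alt puzzle reverse
      = (if puzzle.length = 0 then ([] : List (List String)) else
          (List.range (if 0 < (((List.range puzzle.length).map
                (fun (i : Nat) => ((puzzle.getD i []).length : Int) - i)).min?).getD 0
              then ((((List.range puzzle.length).map
                (fun (i : Nat) => ((puzzle.getD i []).length : Int) - i)).min?).getD 0).toNat
              else 0)).map (fun j =>
            (List.range puzzle.length).map (fun i =>
              if reverse then (puzzle.getD i []).getD ((puzzle.getD i []).length - 1 - i - j) ""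
              else (puzzle.getD i []).getD (i + j) ""))) := rfl
  rw [halt]
  unfold shifted_sub_puzzle
  have hsplit : (fun (acc : List (List String)) (p : Int × List String) =>
        if reverse then
          acc ++ [PySem.List.slice ((PySem.List.slice? p.2 none none (-1)).getD []) (some p.1) none]
        else acc ++ [PySem.List.slice p.2 (some p.1) none])
      = (fun acc p => acc ++ [if reverse then
          PySem.List.slice ((PySem.List.slice? p.2 none none (-1)).getD []) (some p.1) none
        else PySem.List.slice p.2 (some p.1) none]) := by
    funext acc p; split <;> rfl
  rw [hsplit, foldl_append_map, map_enumerate_eq, List.nil_append]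
  have hrows : (List.range puzzle.length).map
        (fun (i : Nat) => if reverse then
            PySem.List.slice ((PySem.List.slice? (puzzle.getD i []) none none (-1)).getD []) (some ((0:Int) + i)) none
          else PySem.List.slice (puzzle.getD i []) (some ((0:Int) + i)) none)
      = (List.range puzzle.length).map
        (fun (i : Nat) => (if reverse then (puzzle.getD i []).reverse else puzzle.getD i []).drop i) := by
    apply List.map_congr_left
    intro i _
    cases reverse <;>
      simp [PySem.List.slice?_none_none_neg_one, PySem.List.slice_from_natCast]
  rw [hrows, pvZipStar_eq]
  by_cases hn : puzzle.length = 0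
  · rw [List.length_eq_zero_iff] at hn
    subst hn
    simp [pvMinLen]
  · rw [if_neg hn]
    set R := (List.range puzzle.length).map
        (fun (i : Nat) => (if reverse then (puzzle.getD i []).reverse else puzzle.getD i []).drop i) with hR
    have hlens : R.map List.length
        = (List.range puzzle.length).map (fun (i : Nat) => (puzzle.getD i []).length - i) := by
      rw [hR, List.map_map]
      apply List.map_congr_left
      intro i _
      cases reverse <;> simp
    have hcount : (if 0 < (((List.range puzzle.length).map
            (fun (i : Nat) => ((puzzle.getD i []).length : Int) - i)).min?).getD 0
          then ((((List.range puzzle.length).map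
            (fun (i : Nat) => ((puzzle.getD i []).length : Int) - i)).min?).getD 0).toNat
          else 0) = pvMinLen R := by
      rw [show ∀ m : Int, (if 0 < m then m.toNat else 0) = m.toNat from fun m => by split <;> omega]
      rw [min?_getD_toNat, List.map_map]
      unfold pvMinLen
      rw [hlens]
      have hmaps : (List.range puzzle.length).map (Int.toNat ∘ fun (i : Nat) => ((puzzle.getD i []).length : Int) - i)
          = (List.range puzzle.length).map (fun (i : Nat) => (puzzle.getD i []).length - i) := by
        apply List.map_congr_left
        intro i _
        simp only [Function.comp]
        omega
      rw [hmaps]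
    rw [hcount]
    apply List.map_congr_left
    intro j hj
    rw [List.mem_range] at hj
    rw [hR, List.map_map]
    apply List.map_congr_left
    intro i hi
    rw [List.mem_range] at hi
    have hmem : ((puzzle.getD i []).length - i) ∈ R.map List.length := by
      rw [hlens]
      exact List.mem_map.mpr ⟨i, List.mem_range.mpr hi, rfl⟩
    have hbound : j < (puzzle.getD i []).length - i := by
      have := pvMinLen_le_mem R _ hmem
      omega
    simp only [Function.comp]
    cases reverse with
    | false => simp [List.getD, List.getElem?_drop]
    | true =>
      have hlt : i + j < (puzzle.getD i []).length := by omega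
      generalize hrow : puzzle.getD i [] = row at hlt ⊢
      show (row.reverse.drop i).getD j "" = row.getD (row.length - 1 - i - j) ""
      simp only [List.getD, List.getElem?_drop, List.getElem?_reverse (by simpa using hlt)]
      congr 2
      omega

-- ===== VERDICT (by name: the statement is the Claim_ definition above) =====
theorem shifted_sub_puzzle_spec : Claim_equal_shifted_sub_puzzle := by
  intro puzzle reverse _
  unfold Spec_shifted_sub_puzzle
  exact pvMain puzzle reverse
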